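-- pv_equiv track=rewrite | github.com/RojanNessari/dental-ml-project | src/clinical_notes.py | summarize_quadrant_detections
-- ===== SOURCE A (Python) =====
-- from collections import Counter, defaultdict
-- from typing import Dict, List, Tuple
--
-- def summarize_quadrant_detections(detections: List[Dict]) -> str:
--     """
--     Create a short summary sentence for one quadrant.
--
--     Parameters
--     ----------
--     detections : List[Dict]
--         Detections in a single quadrant.
--
--     Returns
--     -------
--     str
--         Human-readable summary sentence.
--
--     Example
--     -------
--     >>> summarize_quadrant_detections([{"class_name": "Caries", "bbox": [1,2,3,4], "score": 0.8}])
--     '1 caries detected.'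
--     """
--     if not detections:
--         return "No major findings detected."
--
--     counts = Counter(det["class_name"] for det in detections)
--
--     parts = []
--     for class_name, count in sorted(counts.items()):
--         label = class_name.lower()
--         parts.append(f"{count} {label}" + ("" if count == 1 else "s"))
--
--     return ", ".join(parts).capitalize() + " detected."
-- ===== SOURCE B (Python) =====
-- def _fmt(name, count):
--     return f"{count} {name.lower()}" + ("" if count == 1 else "s")
--
-- def summarize_quadrant_detections(detections):
--     if not detections:
--         return "No major findings detected."
--     names = sorted(det["class_name"] for det in detections)
--     parts = []
--     cur, count = names[0], 0
--     for name in names: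
--         if name == cur:
--             count += 1
--         else:
--             parts.append(_fmt(cur, count))
--             cur, count = name, 1
--     parts.append(_fmt(cur, count))
--     return ", ".join(parts).capitalize() + " detected."
-- ===== Notes on version B (the rewrite author's own statement) =====
-- stated objective: alternative
-- what changed: B sorts the whole list of class names once and produces each summary part in a single linear scan that counts run lengths with a (current, count) accumulator, instead of building a Counter frequency map and sorting its items.
import Mathlib
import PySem

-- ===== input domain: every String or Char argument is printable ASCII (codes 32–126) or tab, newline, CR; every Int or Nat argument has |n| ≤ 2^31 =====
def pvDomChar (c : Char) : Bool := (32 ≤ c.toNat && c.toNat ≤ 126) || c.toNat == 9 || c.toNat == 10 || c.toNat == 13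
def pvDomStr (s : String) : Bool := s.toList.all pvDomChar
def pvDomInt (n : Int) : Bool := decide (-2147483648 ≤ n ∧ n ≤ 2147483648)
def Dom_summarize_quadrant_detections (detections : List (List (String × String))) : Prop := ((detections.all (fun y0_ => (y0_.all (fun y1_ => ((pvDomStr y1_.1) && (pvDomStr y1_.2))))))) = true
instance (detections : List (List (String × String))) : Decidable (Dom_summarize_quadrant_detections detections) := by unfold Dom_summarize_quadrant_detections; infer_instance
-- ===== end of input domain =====

-- B replaces A's Counter-then-sort-items with one sort of all names plus a single run-length scan (alternative algorithm, same cost).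

-- shared helper: str.capitalize() ported by hand — exact on the ASCII domain (titlecase = upper there)
def pyCapitalize (s : String) : String :=
  match s.toList with
  | [] => ""
  | c :: rest => String.ofList (PySem.Chars.upper [c] ++ PySem.Chars.lower rest)

-- shared helper: the list [det["class_name"] for det in detections]; none = KeyError (excluded by Pre_)
def pyClassNames : List (List (String × String)) → Option (List String)
  | [] => some []
  | det :: rest =>
    match List.lookup "class_name" det with
    | none => none
    | some n =>
      match pyClassNames rest with
      | none => none
      | some ns => some (n :: ns)

-- ===== PORT A =====
def summarize_quadrant_detections (detections : List (List (String × String))) : String :=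
  if detections = [] then "No major findings detected."
  else
    match pyClassNames detections with
    | none => ""   -- unreachable under Pre_ (Python raises KeyError)
    | some names =>
      let counts := PySem.Dict.counter names
      let parts := (PySem.List.sorted2 counts.items (fun p => p.1) (fun p => p.2)).map
        (fun p => PySem.Int.toStr p.2 ++ " " ++ PySem.Str.lower p.1 ++ (if p.2 == 1 then "" else "s"))
      pyCapitalize (PySem.Str.join ", " parts) ++ " detected."

-- ===== PORT B =====
-- Source B's helper _fmt(name, count)
def fmtPart (name : String) (count : Int) : String :=
  PySem.Int.toStr count ++ " " ++ PySem.Str.lower name ++ (if count == 1 then "" else "s")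

def summarize_quadrant_detections_alt (detections : List (List (String × String))) : String :=
  if detections = [] then "No major findings detected."
  else
    match pyClassNames detections with
    | none => ""   -- unreachable under Pre_ (Python raises KeyError)
    | some ns =>
      match PySem.List.sorted ns (fun x => x) with
      | [] => ""   -- unreachable: names is nonempty when detections is
      | n0 :: t =>
        -- for name in names: running (parts, cur, count) accumulator
        let st := (n0 :: t).foldl
          (fun (st : List String × String × Int) name =>
            if name == st.2.1 then (st.1, st.2.1, st.2.2 + 1)
            else (st.1 ++ [fmtPart st.2.1 st.2.2], name, 1))
          ([], n0, 0)
        pyCapitalize (PySem.Str.join ", " (st.1 ++ [fmtPart st.2.1 st.2.2])) ++ " detected."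

-- ===== PRECONDITION & SPEC =====
-- Pre_ excludes exactly the inputs where some detection lacks the "class_name" key: Python raises KeyError there.
def Pre_summarize_quadrant_detections (detections : List (List (String × String))) : Prop :=
  ∀ det ∈ detections, (List.lookup "class_name" det).isSome = true
instance (detections : List (List (String × String))) : Decidable (Pre_summarize_quadrant_detections detections) := by unfold Pre_summarize_quadrant_detections; infer_instance

def pvWitness_summarize_quadrant_detections : (List (List (String × String))) :=
  [[("class_name", "Caries")], [("class_name", "Caries")], [("class_name", "Abscess")]]

def Spec_summarize_quadrant_detections (detections : List (List (String × String))) (out : String) : Prop := out = summarize_quadrant_detections_alt detections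
instance (detections : List (List (String × String))) (out : String) : Decidable (Spec_summarize_quadrant_detections detections out) := by unfold Spec_summarize_quadrant_detections; infer_instance

-- ===== CLAIM (what is proved, stated in full; the proofs are below) =====
def Claim_equal_summarize_quadrant_detections : Prop := ∀ (detections : List (List (String × String))), Dom_summarize_quadrant_detections detections → Pre_summarize_quadrant_detections detections → Spec_summarize_quadrant_detections detections (summarize_quadrant_detections detections)

-- ===== LEMMAS AND PROOFS =====

theorem pyClassNames_isSome (detections : List (List (String × String)))
    (h : Pre_summarize_quadrant_detections detections) :
    ∃ names, pyClassNames detections = some names := by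
  induction detections with
  | nil => exact ⟨[], rfl⟩
  | cons det rest ih =>
    have h1 := h det (List.mem_cons_self ..)
    obtain ⟨n, hn⟩ := Option.isSome_iff_exists.mp h1
    obtain ⟨ns, hns⟩ := ih (fun d hd => h d (List.mem_cons_of_mem _ hd))
    exact ⟨n :: ns, by simp [pyClassNames, hn, hns]⟩

theorem pyClassNames_length (detections : List (List (String × String))) (names : List String)
    (h : pyClassNames detections = some names) : names.length = detections.length := by
  induction detections generalizing names with
  | nil => simp [pyClassNames] at h; simp [h]
  | cons det rest ih =>
    simp only [pyClassNames] at h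
    cases hl : List.lookup "class_name" det with
    | none => rw [hl] at h; cases h
    | some n =>
      rw [hl] at h
      cases hr : pyClassNames rest with
      | none => rw [hr] at h; cases h
      | some ns =>
        rw [hr] at h
        cases h
        simp [ih ns hr]

-- === A-side characterisation (Counter items, sorted) ===

theorem insertBy_congr {α : Type} (f g : α → α → Bool) (x : α) (ys : List α)
    (h : ∀ y ∈ ys, f x y = g x y) :
    PySem.List.insertBy f x ys = PySem.List.insertBy g x ys := by
  induction ys with
  | nil => rfl
  | cons y ys ih =>
    simp only [PySem.List.insertBy]
    rw [h y (List.mem_cons_self ..), ih (fun z hz => h z (List.mem_cons_of_mem _ hz))]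

theorem foldl_insertBy_congr {α : Type} (f g : α → α → Bool) (xs acc : List α)
    (h : ∀ a ∈ xs, ∀ b, (b ∈ acc ∨ b ∈ xs) → f a b = g a b) :
    xs.foldl (fun acc x => PySem.List.insertBy f x acc) acc
      = xs.foldl (fun acc x => PySem.List.insertBy g x acc) acc := by
  induction xs generalizing acc with
  | nil => rfl
  | cons x xs ih =>
    simp only [List.foldl_cons]
    rw [insertBy_congr f g x acc
      (fun y hy => h x (List.mem_cons_self ..) y (Or.inl hy))]
    apply ih
    intro a ha b hb
    apply h a (List.mem_cons_of_mem _ ha)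
    rcases hb with hb | hb
    · rcases (PySem.List.mem_insertBy g x b acc).mp hb with hb | hb
      · exact Or.inr (hb ▸ List.mem_cons_self ..)
      · exact Or.inl hb
    · exact Or.inr (List.mem_cons_of_mem _ hb)

-- when the first key is injective on the list, the tuple-key sort equals the first-key sort
theorem sorted2_eq_sorted_of_inj {α κ₁ κ₂ : Type} [LinearOrder κ₁] [LinearOrder κ₂]
    (xs : List α) (k1 : α → κ₁) (k2 : α → κ₂)
    (hinj : ∀ a ∈ xs, ∀ b ∈ xs, k1 a = k1 b → a = b) :
    PySem.List.sorted2 xs k1 k2 = PySem.List.sorted xs k1 := by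
  rw [PySem.List.sorted_eq_foldl_insertBy]
  show xs.foldl (fun acc x => PySem.List.insertBy
      (fun a b => decide (k1 a < k1 b) || (!decide (k1 b < k1 a) && decide (k2 a < k2 b))) x acc) []
    = _
  apply foldl_insertBy_congr
  intro a ha b hb
  rcases hb with hb | hb
  · cases hb
  · rcases lt_trichotomy (k1 a) (k1 b) with hlt | heq | hgt
    · simp [hlt, not_lt.mpr hlt.le]
    · have : a = b := hinj a ha b hb heq
      subst this
      simp
    · simp [hgt, not_lt.mpr hgt.le]

theorem sorted_items_counter (names : List String) :
    PySem.List.sorted (PySem.Dict.counter names).items (fun p => p.1)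
      = (PySem.List.sorted (PySem.Set.ofList names) (fun x => x)).map
          (fun k => (k, (names.count k : Int))) := by
  apply PySem.List.sorted_eq_of_perm_of_pairwise_lt
  · rw [PySem.Dict.items_counter]
    exact (PySem.List.sorted_perm (PySem.Set.ofList names) (fun x => x) false).map _
  · have hp := PySem.List.sorted_ofList_pairwise_lt names
    exact List.Pairwise.map _ (fun a b hab => hab) hp

theorem items_fst_inj (names : List String) :
    ∀ a ∈ (PySem.Dict.counter names).items, ∀ b ∈ (PySem.Dict.counter names).items,
      a.1 = b.1 → a = b := by
  intro a ha b hb hfst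
  rw [PySem.Dict.items_counter] at ha hb
  obtain ⟨ka, _, rfl⟩ := List.mem_map.mp ha
  obtain ⟨kb, _, rfl⟩ := List.mem_map.mp hb
  simp only at hfst
  subst hfst
  rfl

-- === B-side characterisation (run-length scan of the sorted list) ===

-- the parts emitted by the rest of the scan, starting inside a run of `cur` already counted `c` times
def runsFrom (cur : String) (c : Int) : List String → List String
  | [] => [fmtPart cur c]
  | y :: ys => if y == cur then runsFrom cur (c + 1) ys else fmtPart cur c :: runsFrom y 1 ys

def runsParts : List String → List String
  | [] => []
  | x :: xs => runsFrom x 1 xs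

-- first element of each run of a sorted list
def dedupKeys : List String → List String
  | [] => []
  | x :: xs => x :: dedupKeys (xs.dropWhile (· == x))
termination_by s => s.length
decreasing_by
  exact Nat.lt_succ_of_le (List.length_dropWhile_le _ _)

theorem fold_runs (l : List String) (parts : List String) (cur : String) (c : Int) :
    (let st := l.foldl
        (fun (st : List String × String × Int) name =>
          if name == st.2.1 then (st.1, st.2.1, st.2.2 + 1)
          else (st.1 ++ [fmtPart st.2.1 st.2.2], name, 1))
        (parts, cur, c)
     st.1 ++ [fmtPart st.2.1 st.2.2]) = parts ++ runsFrom cur c l := by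
  induction l generalizing parts cur c with
  | nil => simp [runsFrom]
  | cons y ys ih =>
    simp only [List.foldl_cons, runsFrom]
    by_cases h : y = cur
    · simp only [h, BEq.rfl, if_true]
      exact ih parts cur (c + 1)
    · have hb : (y == cur) = false := beq_false_of_ne h
      simp only [hb, Bool.false_eq_true, if_false]
      rw [ih (parts ++ [fmtPart cur c]) y 1, List.append_assoc]
      rfl

theorem mem_dropWhile_gt (x : String) (xs : List String)
    (hp : List.Pairwise (· ≤ ·) (x :: xs)) :
    ∀ z ∈ xs.dropWhile (· == x), x < z := by
  induction xs with
  | nil => intro z hz; cases hz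
  | cons y ys ih =>
    rcases List.pairwise_cons.mp hp with ⟨hx, hys⟩
    intro z hz
    by_cases h : y = x
    · subst h
      rw [List.dropWhile_cons_of_pos (by simp)] at hz
      exact ih (List.pairwise_cons.mpr
        ⟨fun z hz => hx z (List.mem_cons_of_mem _ hz), (List.pairwise_cons.mp hys).2⟩) z hz
    · rw [List.dropWhile_cons_of_neg (by simp [h])] at hz
      rcases List.mem_cons.mp hz with rfl | hz
      · exact lt_of_le_of_ne (hx z (List.mem_cons_self ..)) (Ne.symm h)
      · exact lt_of_lt_of_le
          (lt_of_le_of_ne (hx y (List.mem_cons_self ..)) (Ne.symm h))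
          ((List.pairwise_cons.mp hys).1 z hz)

theorem dedupKeys_subset (s : List String) : ∀ k ∈ dedupKeys s, k ∈ s := by
  fun_induction dedupKeys s with
  | case1 => intro k hk; cases hk
  | case2 x xs ih =>
    intro k hk
    rcases List.mem_cons.mp hk with rfl | hk
    · exact List.mem_cons_self ..
    · exact List.mem_cons_of_mem _ ((xs.dropWhile_sublist (· == x)).subset (ih k hk))

theorem mem_dedupKeys (s : List String) (hp : List.Pairwise (· ≤ ·) s) :
    ∀ k, k ∈ dedupKeys s ↔ k ∈ s := by
  fun_induction dedupKeys s with
  | case1 => intro k; simp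
  | case2 x xs ih =>
    intro k
    have hp' : List.Pairwise (· ≤ ·) (xs.dropWhile (· == x)) :=
      hp.sublist ((xs.dropWhile_sublist (· == x)).trans (List.sublist_cons_self x xs))
    constructor
    · intro hk
      rcases List.mem_cons.mp hk with rfl | hk
      · exact List.mem_cons_self ..
      · exact List.mem_cons_of_mem _ ((xs.dropWhile_sublist (· == x)).subset
          ((ih hp' k).mp hk))
    · intro hk
      rcases List.mem_cons.mp hk with rfl | hk
      · exact List.mem_cons_self ..
      · by_cases hkx : k = x
        · exact hkx ▸ List.mem_cons_self ..
        · apply List.mem_cons_of_mem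
          apply (ih hp' k).mpr
          -- k ∈ xs, k ≠ x, so k survives the dropWhile of the x-run
          have hsplit : xs.takeWhile (· == x) ++ xs.dropWhile (· == x) = xs :=
            xs.takeWhile_append_dropWhile
          rw [← hsplit] at hk
          rcases List.mem_append.mp hk with hk | hk
          · exact absurd (by simpa using List.mem_takeWhile_imp hk) hkx
          · exact hk

theorem dedupKeys_pairwise_lt (s : List String) (hp : List.Pairwise (· ≤ ·) s) :
    List.Pairwise (· < ·) (dedupKeys s) := by
  fun_induction dedupKeys s with
  | case1 => exact List.Pairwise.nil
  | case2 x xs ih =>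
    have hp' : List.Pairwise (· ≤ ·) (xs.dropWhile (· == x)) :=
      hp.sublist ((xs.dropWhile_sublist (· == x)).trans (List.sublist_cons_self x xs))
    refine List.pairwise_cons.mpr ⟨?_, ih hp'⟩
    intro k hk
    exact mem_dropWhile_gt x xs hp k (dedupKeys_subset _ k hk)

theorem count_eq_zero_of_gt (x : String) (l : List String)
    (h : ∀ z ∈ l, x < z) : l.count x = 0 :=
  List.count_eq_zero.mpr (fun hx => absurd (h x hx) (lt_irrefl x))

theorem runsFrom_eq (xs : List String) (cur : String) (c : Int)
    (hp : List.Pairwise (· ≤ ·) (cur :: xs)) :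
    runsFrom cur c xs
      = fmtPart cur (c + (xs.count cur : Int)) :: runsParts (xs.dropWhile (· == cur)) := by
  induction xs generalizing c with
  | nil => simp [runsFrom, runsParts]
  | cons y ys ih =>
    rcases List.pairwise_cons.mp hp with ⟨hcur, hys⟩
    by_cases h : y = cur
    · subst h
      have hp' : List.Pairwise (· ≤ ·) (y :: ys) := List.pairwise_cons.mpr
        ⟨fun z hz => hcur z (List.mem_cons_of_mem _ hz), (List.pairwise_cons.mp hys).2⟩
      rw [show runsFrom y c (y :: ys) = runsFrom y (c + 1) ys by simp [runsFrom]]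
      rw [ih (c + 1) hp']
      rw [List.dropWhile_cons_of_pos (by simp)]
      congr 1
      simp only [List.count_cons, BEq.rfl, if_true]
      push_cast
      ring
    · have hb : (y == cur) = false := beq_false_of_ne h
      rw [show runsFrom cur c (y :: ys) = fmtPart cur c :: runsFrom y 1 ys by simp [runsFrom, hb]]
      rw [List.dropWhile_cons_of_neg (by simp [hb])]
      have hzero : (y :: ys).count cur = 0 := by
        apply count_eq_zero_of_gt
        intro z hz
        rcases List.mem_cons.mp hz with rfl | hz
        · exact lt_of_le_of_ne (hcur z (List.mem_cons_self ..)) (Ne.symm h)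
        · exact lt_of_lt_of_le
            (lt_of_le_of_ne (hcur y (List.mem_cons_self ..)) (Ne.symm h))
            ((List.pairwise_cons.mp hys).1 z hz)
      rw [hzero]
      simp [runsParts]

theorem runsParts_eq (s : List String) (hp : List.Pairwise (· ≤ ·) s) :
    runsParts s = (dedupKeys s).map (fun k => fmtPart k ((s.count k : Int))) := by
  fun_induction dedupKeys s with
  | case1 => rfl
  | case2 x xs ih =>
    have hp' : List.Pairwise (· ≤ ·) (xs.dropWhile (· == x)) :=
      hp.sublist ((xs.dropWhile_sublist (· == x)).trans (List.sublist_cons_self x xs))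
    rw [show runsParts (x :: xs) = runsFrom x 1 xs from rfl, runsFrom_eq xs x 1 hp]
    rw [List.map_cons]
    congr 1
    · congr 1
      simp only [List.count_cons, BEq.rfl, if_true]
      push_cast
      ring
    · rw [ih hp']
      apply List.map_congr_left
      intro k hk
      have hkmem : k ∈ xs.dropWhile (· == x) := dedupKeys_subset _ k hk
      have hkgt : x < k := mem_dropWhile_gt x xs hp k hkmem
      congr 1
      have hsplit : xs.takeWhile (· == x) ++ xs.dropWhile (· == x) = xs :=
        xs.takeWhile_append_dropWhile
      have htw : (xs.takeWhile (· == x)).count k = 0 := by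
        apply List.count_eq_zero.mpr
        intro hkin
        have := List.mem_takeWhile_imp hkin
        simp at this
        exact absurd (this ▸ hkgt) (lt_irrefl x)
      have : (x :: xs).count k = (xs.dropWhile (· == x)).count k := by
        rw [List.count_cons, ← hsplit, List.count_append, htw]
        simp [Ne.symm (ne_of_gt hkgt)]
      rw [this]

-- the strictly-increasing key list of B's runs is exactly A's sorted distinct-name list
theorem sorted_ofList_eq_dedupKeys (names : List String) :
    PySem.List.sorted (PySem.Set.ofList names) (fun x => x)
      = dedupKeys (PySem.List.sorted names (fun x => x)) := by
  have hp : List.Pairwise (· ≤ ·) (PySem.List.sorted names (fun x => x)) :=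
    PySem.List.sorted_pairwise names (fun x => x)
  apply PySem.List.sorted_eq_of_perm_of_pairwise_lt
  · apply (List.perm_ext_iff_of_nodup ?_ ?_).mpr
    · intro a
      rw [mem_dedupKeys _ hp a, PySem.List.mem_sorted, PySem.Set.mem_ofList]
    · exact (dedupKeys_pairwise_lt _ hp).imp ne_of_lt
    · exact PySem.Set.nodup_ofList names
  · exact dedupKeys_pairwise_lt _ hp

-- ===== VERDICT (by name: the statement is the Claim_ definition above) =====
theorem summarize_quadrant_detections_spec : Claim_equal_summarize_quadrant_detections := by
  intro detections _ hpre
  unfold Spec_summarize_quadrant_detections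
  unfold summarize_quadrant_detections summarize_quadrant_detections_alt
  by_cases hnil : detections = []
  · simp [hnil]
  · obtain ⟨names, hnames⟩ := pyClassNames_isSome detections hpre
    simp only [hnil, hnames]
    have hlen : names ≠ [] := by
      intro h
      apply hnil
      have := pyClassNames_length detections names hnames
      rw [h] at this
      exact List.length_eq_zero_iff.mp this.symm
    cases hs : PySem.List.sorted names (fun x => x) with
    | nil => exact absurd ((PySem.List.sorted_eq_nil_iff ..).mp hs) hlen
    | cons n0 t =>
      simp only [if_neg not_false]
      -- B's fold = run-length parts of the sorted list
      rw [fold_runs (n0 :: t) [] n0 0]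
      have hrun : runsFrom n0 0 (n0 :: t) = runsFrom n0 1 t := by simp [runsFrom]
      rw [hrun, List.nil_append]
      have hp : List.Pairwise (· ≤ ·) (n0 :: t) :=
        hs ▸ PySem.List.sorted_pairwise names (fun x => x)
      have hB : runsFrom n0 1 t
          = (dedupKeys (n0 :: t)).map (fun k => fmtPart k (((n0 :: t).count k : Int))) :=
        runsParts_eq (n0 :: t) hp
      rw [hB, ← hs]
      -- A's sorted counter items = the same map over sorted distinct names
      rw [sorted2_eq_sorted_of_inj _ _ _ (items_fst_inj names), sorted_items_counter names,
        List.map_map, sorted_ofList_eq_dedupKeys names]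
      congr 1
      congr 1
      congr 1
      congr 1
      funext k
      have hcnt : (PySem.List.sorted names (fun x => x)).count k = names.count k :=
        (PySem.List.sorted_perm names (fun x => x) false).count_eq k
      simp [fmtPart, Function.comp, hcnt]
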